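-- pv_equiv track=rewrite | github.com/hitochan777/kata | atcoder/abc/abc252/C.py | solve
-- ===== SOURCE A (Python) =====
-- def solve(strs, i):
--   used = set()
--   for str in strs:
--     idx = str.find(i)
--     while idx in used:
--       idx += 10
--
--     used.add(idx)
--
--   return max(used)
-- ===== SOURCE B (Python) =====
-- def solve(strs, i):
--     buckets = {}
--     for s in strs:
--         idx = s.find(i)
--         buckets.setdefault(idx % 10, []).append(idx // 10)
--
--     def top(levels):
--         p = None
--         for l in sorted(levels):
--             p = l if p is None else max(l, p + 1)
--         return p
--
--     return max(r + 10 * top(ls) for r, ls in buckets.items())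
-- ===== Notes on version B (the rewrite author's own statement) =====
-- stated objective: faster
-- what changed: A simulates hash-table linear probing insert-by-insert in a shared set; B never probes: it buckets the find-indices by residue mod 10, sorts each bucket's floor-div-10 levels once, and computes each chain's top slot by the closed recurrence p = max(level, p_prev + 1), returning the max of residue + 10*p_top over buckets.
import Mathlib
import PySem

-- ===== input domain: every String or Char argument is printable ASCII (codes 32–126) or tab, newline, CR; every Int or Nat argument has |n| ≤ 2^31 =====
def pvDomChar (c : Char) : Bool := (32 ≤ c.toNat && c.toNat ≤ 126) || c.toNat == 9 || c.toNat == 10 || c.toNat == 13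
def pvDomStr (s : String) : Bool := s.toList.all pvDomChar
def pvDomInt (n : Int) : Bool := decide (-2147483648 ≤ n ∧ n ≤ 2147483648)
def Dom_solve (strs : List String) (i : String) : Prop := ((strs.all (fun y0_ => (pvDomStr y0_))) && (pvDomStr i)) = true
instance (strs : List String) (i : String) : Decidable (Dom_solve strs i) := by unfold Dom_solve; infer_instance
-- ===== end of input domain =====

-- B replaces A's per-insert linear probing in a shared set (quadratic probe steps on
-- colliding inputs) by bucketing find-indices per residue mod 10 and computing each
-- chain's top slot with a sort-then-sweep closed recurrence (measured faster).


-- ===== PORT A =====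
-- `while idx in used: idx += 10` — fuel `used.length + 1` always suffices: each
-- collision consumes a distinct member of `used` (lemma pvProbe_ff below).
def pvProbe (used : PySem.Set Int) (idx : Int) : Nat → Int
  | 0 => idx
  | f + 1 => if idx ∈ used then pvProbe used (idx + 10) f else idx

def solve (strs : List String) (i : String) : Int :=
  let used : PySem.Set Int := strs.foldl
    (fun used s => PySem.Set.add used (pvProbe used (PySem.Str.find s i) (used.length + 1)))
    PySem.Set.empty
  (PySem.List.max? used (fun x => x)).getD 0

-- ===== PORT B =====
-- top(levels): p = None; for l in sorted(levels): p = l if p is None else max(l, p+1)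
def pvTop (levels : List Int) : Option Int :=
  (PySem.List.sorted levels (fun x => x) false).foldl
    (fun p l => some (match p with | none => l | some q => max l (q + 1))) none

def solve_alt (strs : List String) (i : String) : Int :=
  let buckets : PySem.Dict Int (List Int) := strs.foldl
    (fun d s =>
      let idx := PySem.Str.find s i
      d.modify (PySem.Int.mod idx 10) [] (fun ls => ls ++ [PySem.Int.floordiv idx 10]))
    PySem.Dict.empty
  (PySem.List.max?
    (buckets.items.map (fun rls => rls.1 + 10 * ((pvTop rls.2).getD 0)))
    (fun x => x)).getD 0

-- ===== PRECONDITION & SPEC =====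
-- Pre_ excludes only the empty list, on which Python's max([]) raises ValueError (in both A and B).
def Pre_solve (strs : List String) (i : String) : Prop := strs ≠ []
instance (strs : List String) (i : String) : Decidable (Pre_solve strs i) := by unfold Pre_solve; infer_instance

def pvWitness_solve : List String × String := (["ab", "b", "c"], "b")

def Spec_solve (strs : List String) (i : String) (out : Int) : Prop := out = solve_alt strs i
instance (strs : List String) (i : String) (out : Int) : Decidable (Spec_solve strs i out) := by unfold Spec_solve; infer_instance

-- ===== CLAIM (what is proved, stated in full; the proofs are below) =====
def Claim_equal_solve : Prop := ∀ (strs : List String) (i : String), Dom_solve strs i → Pre_solve strs i → Spec_solve strs i (solve strs i)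

-- ===== LEMMAS AND PROOFS =====

-- `FF S x m`: m is the first free slot of the probing chain x, x+10, x+20, … w.r.t. S.
def pvFF (S : List Int) (x m : Int) : Prop :=
  m ∉ S ∧ (∃ k : Nat, m = x + 10 * (k : Int)) ∧ ∀ k : Nat, x + 10 * (k : Int) < m → x + 10 * (k : Int) ∈ S

theorem pvFF_unique {S : List Int} {x m m' : Int} (h : pvFF S x m) (h' : pvFF S x m') : m = m' := by
  obtain ⟨hm, ⟨k, hk⟩, hmin⟩ := h
  obtain ⟨hm', ⟨k', hk'⟩, hmin'⟩ := h'
  rcases lt_trichotomy m m' with hlt | heq | hgt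
  · exact absurd (hmin' k (by omega)) (by rw [← hk]; exact hm)
  · exact heq
  · exact absurd (hmin k' (by omega)) (by rw [← hk']; exact hm')

theorem pvFF_congr {S S' : List Int} (hmem : ∀ y, y ∈ S ↔ y ∈ S') {x m : Int} (h : pvFF S x m) :
    pvFF S' x m := by
  obtain ⟨hm, hch, hmin⟩ := h
  exact ⟨fun c => hm ((hmem m).2 c), hch, fun k hk => (hmem _).1 (hmin k hk)⟩

-- fuel argument: members of S in the chain at or above x
def pvCC (S : List Int) (x : Int) : Nat := (S.filter (fun y => x ≤ y && (y - x) % 10 == 0)).length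

theorem pvCC_lt {S : List Int} (hN : S.Nodup) {x : Int} (hx : x ∈ S) : pvCC S (x + 10) < pvCC S x := by
  unfold pvCC
  have hev : S.filter (fun y => x + 10 ≤ y && (y - (x + 10)) % 10 == 0)
      = (S.filter (fun y => x ≤ y && (y - x) % 10 == 0)).filter (fun y => y ≠ x) := by
    rw [List.filter_filter]
    apply List.filter_congr
    intro y _
    rw [Bool.eq_iff_iff]
    simp only [Bool.and_eq_true, decide_eq_true_eq, beq_iff_eq, ne_eq]
    omega
  rw [hev]
  refine List.length_filter_lt_length_iff_exists.mpr ⟨x, ?_, by simp⟩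
  simp [List.mem_filter, hx]

theorem pvProbe_ff : ∀ (f : Nat) (S : List Int), S.Nodup → ∀ x : Int, pvCC S x < f → pvFF S x (pvProbe S x f) := by
  intro f
  induction f with
  | zero => intro S _ x h; exact absurd h (Nat.not_lt_zero _)
  | succ f ih =>
    intro S hN x h
    by_cases hx : x ∈ S
    · have hcc := pvCC_lt hN hx
      have hih := ih S hN (x + 10) (by omega)
      simp only [pvProbe, if_pos hx]
      obtain ⟨hm, ⟨k, hk⟩, hmin⟩ := hih
      refine ⟨hm, ⟨k + 1, by push_cast; omega⟩, ?_⟩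
      intro j hj
      cases j with
      | zero => simpa using hx
      | succ j =>
        have hj' : x + 10 + 10 * ((j : Int)) < pvProbe S (x + 10) f := by push_cast at hj ⊢; omega
        have := hmin j hj'
        have hcast : x + 10 * ((j + 1 : Nat) : Int) = x + 10 + 10 * (j : Int) := by push_cast; ring
        rw [hcast]
        exact this
    · simp only [pvProbe, if_neg hx]
      refine ⟨hx, ⟨0, by simp⟩, ?_⟩
      intro k hk
      have : (0 : Int) ≤ (k : Int) := Int.natCast_nonneg k
      omega

theorem pvStep_ff (S : List Int) (hN : S.Nodup) (x : Int) : pvFF S x (pvProbe S x (S.length + 1)) := by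
  refine pvProbe_ff _ S hN x ?_
  have := List.length_filter_le (fun y => x ≤ y && (y - x) % 10 == 0) S
  unfold pvCC; omega

-- the A-side loop body
def pvStep (S : List Int) (x : Int) : List Int := PySem.Set.add S (pvProbe S x (S.length + 1))

theorem pvStep_nodup {S : List Int} (hN : S.Nodup) (x : Int) : (pvStep S x).Nodup := by
  unfold pvStep PySem.Set.add PySem.Set.contains
  split
  · exact hN
  · next h =>
      refine hN.append (List.nodup_singleton _) ?_
      intro y hy hy'
      simp at hy'
      subst hy'
      simp at h
      exact h hy

theorem pvStep_mem {S : List Int} (x y : Int) :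
    y ∈ pvStep S x ↔ y ∈ S ∨ y = pvProbe S x (S.length + 1) := PySem.Set.mem_add S _ y

-- same-membership states develop in lockstep
def pvE (S S' : List Int) : Prop := S.Nodup ∧ S'.Nodup ∧ ∀ y, y ∈ S ↔ y ∈ S'

theorem pvStep_E {S S' : List Int} (h : pvE S S') (x : Int) : pvE (pvStep S x) (pvStep S' x) := by
  obtain ⟨hN, hN', hmem⟩ := h
  have heq : pvProbe S x (S.length + 1) = pvProbe S' x (S'.length + 1) :=
    pvFF_unique (pvFF_congr hmem (pvStep_ff S hN x)) (pvStep_ff S' hN' x)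
  exact ⟨pvStep_nodup hN x, pvStep_nodup hN' x,
    fun y => by rw [pvStep_mem, pvStep_mem, heq, hmem y]⟩

-- chain membership of a first-free slot
theorem pvFF_chain_ge {S : List Int} {x m : Int} (h : pvFF S x m) :
    x ≤ m ∧ (10 : Int) ∣ m - x := by
  obtain ⟨_, ⟨k, hk⟩, _⟩ := h
  constructor
  · have : (0 : Int) ≤ (k : Int) := Int.natCast_nonneg k
    omega
  · exact ⟨k, by omega⟩

-- minimality restated on integers
theorem pvFF_min' {S : List Int} {x m : Int} (h : pvFF S x m) :
    ∀ y : Int, x ≤ y → y < m → (10 : Int) ∣ y - x → y ∈ S := by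
  intro y hy1 hy2 hy3
  obtain ⟨k, hk⟩ := hy3
  have hk0 : 0 ≤ k := by omega
  have := h.2.2 k.toNat (by push_cast; omega)
  have hyy : x + 10 * ((k.toNat : Int)) = y := by push_cast; omega
  rwa [hyy] at this

-- build a pvFF certificate from integer facts
theorem pvFF_of {S : List Int} {x m : Int} (h1 : m ∉ S) (h2 : x ≤ m) (h3 : (10 : Int) ∣ m - x)
    (h4 : ∀ y : Int, x ≤ y → y < m → (10 : Int) ∣ y - x → y ∈ S) : pvFF S x m := by
  refine ⟨h1, ?_, ?_⟩
  · obtain ⟨k, hk⟩ := h3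
    exact ⟨k.toNat, by push_cast; omega⟩
  · intro k hk
    refine h4 _ ?_ hk ⟨(k : Int), by ring⟩
    have : (0 : Int) ≤ (k : Int) := Int.natCast_nonneg k
    omega

-- the commuting case a ≤ b within one probing chain
theorem pvSwap_le {S : List Int} (hN : S.Nodup) {a b : Int} (hdvd : (10 : Int) ∣ b - a)
    (hab : a ≤ b) (y : Int) :
    y ∈ pvStep (pvStep S a) b ↔ y ∈ pvStep (pvStep S b) a := by
  have hp : pvFF S a (pvProbe S a (S.length + 1)) := pvStep_ff S hN a
  have hq : pvFF S b (pvProbe S b (S.length + 1)) := pvStep_ff S hN b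
  set p := pvProbe S a (S.length + 1) with hpdef
  set q := pvProbe S b (S.length + 1) with hqdef
  have hNa : (pvStep S a).Nodup := pvStep_nodup hN a
  have hNb : (pvStep S b).Nodup := pvStep_nodup hN b
  have hp2 : pvFF (pvStep S a) b (pvProbe (pvStep S a) b ((pvStep S a).length + 1)) :=
    pvStep_ff _ hNa b
  set p2 := pvProbe (pvStep S a) b ((pvStep S a).length + 1) with hp2def
  by_cases hpb : p < b
  · -- p lands strictly below b: the two inserts do not interact
    have hq2 : pvFF (pvStep S b) a (pvProbe (pvStep S b) a ((pvStep S b).length + 1)) :=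
      pvStep_ff _ hNb a
    set q2 := pvProbe (pvStep S b) a ((pvStep S b).length + 1) with hq2def
    have hqb := pvFF_chain_ge hq
    -- p2 = q
    have hep2 : p2 = q := by
      refine pvFF_unique hp2 (pvFF_of ?_ hqb.1 hqb.2 ?_)
      · rw [pvStep_mem]; push_neg
        exact ⟨hq.1, by omega⟩
      · intro z hz1 hz2 hz3
        rw [pvStep_mem]
        exact Or.inl (pvFF_min' hq z hz1 hz2 hz3)
    -- q2 = p
    have heq2 : q2 = p := by
      have hpa := pvFF_chain_ge hp
      refine pvFF_unique hq2 (pvFF_of ?_ hpa.1 hpa.2 ?_)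
      · rw [pvStep_mem]; push_neg
        refine ⟨hp.1, ?_⟩
        have := pvFF_chain_ge hq
        omega
      · intro z hz1 hz2 hz3
        rw [pvStep_mem]
        exact Or.inl (pvFF_min' hp z hz1 hz2 hz3)
    rw [pvStep_mem, pvStep_mem, pvStep_mem, pvStep_mem, ← hp2def, ← hq2def, hep2, heq2]
    tauto
  · -- b ≤ p: the two probes reach the same slot first
    push_neg at hpb
    have hpa := pvFF_chain_ge hp
    have heqp : q = p := by
      refine pvFF_unique hq (pvFF_of hp.1 hpb (by omega) ?_)
      intro z hz1 hz2 hz3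
      exact pvFF_min' hp z (by omega) hz2 (by omega)
    have hsame : pvStep S b = pvStep S a := by
      unfold pvStep
      rw [← hpdef, ← hqdef, heqp]
    rw [hsame]
    have hq2 : pvFF (pvStep S a) a (pvProbe (pvStep S a) a ((pvStep S a).length + 1)) :=
      pvStep_ff _ hNa a
    set q2 := pvProbe (pvStep S a) a ((pvStep S a).length + 1) with hq2def
    have hee : q2 = p2 := by
      have hc2 := pvFF_chain_ge hq2
      have hbq2 : b ≤ q2 := by
        by_contra hlt
        push_neg at hlt
        have : q2 ∈ S := pvFF_min' hp q2 hc2.1 (by omega) hc2.2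
        exact hq2.1 ((pvStep_mem a q2).mpr (Or.inl this))
      refine pvFF_unique (pvFF_of hq2.1 hbq2 (by omega) ?_) hp2
      intro z hz1 hz2 hz3
      exact pvFF_min' hq2 z (by omega) hz2 (by omega)
    rw [pvStep_mem, pvStep_mem, pvStep_mem, pvStep_mem, ← hp2def, ← hq2def, hee]

-- the crux: probing inserts commute (at the level of membership)
theorem pvStep_swap {S : List Int} (hN : S.Nodup) (a b y : Int) :
    y ∈ pvStep (pvStep S a) b ↔ y ∈ pvStep (pvStep S b) a := by
  by_cases hdvd : (10 : Int) ∣ b - a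
  · rcases le_total a b with hab | hba
    · exact pvSwap_le hN hdvd hab y
    · exact (pvSwap_le hN (by omega) hba y).symm
  · -- different chains: each insert leaves the other's first-free slot unchanged
    have hp := pvStep_ff S hN a
    have hq := pvStep_ff S hN b
    set p := pvProbe S a (S.length + 1)
    set q := pvProbe S b (S.length + 1)
    have hpc := pvFF_chain_ge hp
    have hqc := pvFF_chain_ge hq
    have hp2 : pvFF (pvStep S a) b (pvProbe (pvStep S a) b ((pvStep S a).length + 1)) :=
      pvStep_ff _ (pvStep_nodup hN a) b
    have hq2 : pvFF (pvStep S b) a (pvProbe (pvStep S b) a ((pvStep S b).length + 1)) :=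
      pvStep_ff _ (pvStep_nodup hN b) a
    have hep2 : pvProbe (pvStep S a) b ((pvStep S a).length + 1) = q := by
      refine pvFF_unique hp2 (pvFF_of ?_ hqc.1 hqc.2 ?_)
      · rw [pvStep_mem]; push_neg; exact ⟨hq.1, by omega⟩
      · intro z h1 h2 h3; exact (pvStep_mem _ _).mpr (Or.inl (pvFF_min' hq z h1 h2 h3))
    have heq2 : pvProbe (pvStep S b) a ((pvStep S b).length + 1) = p := by
      refine pvFF_unique hq2 (pvFF_of ?_ hpc.1 hpc.2 ?_)
      · rw [pvStep_mem]; push_neg; exact ⟨hp.1, by omega⟩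
      · intro z h1 h2 h3; exact (pvStep_mem _ _).mpr (Or.inl (pvFF_min' hp z h1 h2 h3))
    rw [pvStep_mem, pvStep_mem, pvStep_mem, pvStep_mem, hep2, heq2]
    tauto

theorem pvE_trans {S T U : List Int} (h1 : pvE S T) (h2 : pvE T U) : pvE S U :=
  ⟨h1.1, h2.2.1, fun y => (h1.2.2 y).trans (h2.2.2 y)⟩

theorem pvFold_E : ∀ (l : List Int) {S S'}, pvE S S' → pvE (l.foldl pvStep S) (l.foldl pvStep S') := by
  intro l
  induction l with
  | nil => intro S S' h; exact h
  | cons x t ih => intro S S' h; exact ih (pvStep_E h x)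

theorem pvFold_perm {xs ys : List Int} (hp : xs.Perm ys) :
    ∀ S S', pvE S S' → pvE (xs.foldl pvStep S) (ys.foldl pvStep S') := by
  induction hp with
  | nil => intro S S' h; exact h
  | cons x _ ih => intro S S' h; exact ih _ _ (pvStep_E h x)
  | swap x y l =>
    intro S S' h
    simp only [List.foldl_cons]
    refine pvFold_E l (pvE_trans (pvStep_E (pvStep_E h y) x) ?_)
    have hN' : S'.Nodup := h.2.1
    exact ⟨pvStep_nodup (pvStep_nodup hN' y) x, pvStep_nodup (pvStep_nodup hN' x) y,
      fun z => pvStep_swap hN' y x z⟩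
  | trans h1 h2 ih1 ih2 =>
    intro S S' h
    exact pvE_trans (ih1 S S ⟨h.1, h.1, fun y => Iff.rfl⟩) (ih2 S S' h)

-- regrouping: any list is a permutation of its residue buckets
theorem pvRegroup {α β : Type} [DecidableEq β] (key : α → β) :
    ∀ (rs : List β) (xs : List α), rs.Nodup → (∀ x ∈ xs, key x ∈ rs) →
      xs.Perm (rs.flatMap (fun r => xs.filter (fun x => key x = r))) := by
  intro rs
  induction rs with
  | nil =>
    intro xs _ hmem
    have : xs = [] := List.eq_nil_iff_forall_not_mem.mpr (fun x hx => by simpa using hmem x hx)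
    simp [this]
  | cons r rs ih =>
    intro xs hnd hmem
    have h1 : (xs.filter (fun x => key x = r) ++ xs.filter (fun x => !decide (key x = r))).Perm xs :=
      List.filter_append_perm _ xs
    have hside : ∀ x ∈ xs.filter (fun x => !decide (key x = r)), key x ∈ rs := by
      intro x hx
      rcases List.mem_filter.mp hx with ⟨hx1, hx2⟩
      rcases List.mem_cons.mp (hmem x hx1) with h | h
      · simp_all
      · exact h
    have h2 := ih (xs.filter (fun x => !decide (key x = r))) hnd.of_cons hside
    have h3 : ∀ r' ∈ rs,
        (xs.filter (fun x => !decide (key x = r))).filter (fun x => key x = r')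
          = xs.filter (fun x => key x = r') := by
      intro r' hr'
      rw [List.filter_filter]
      apply List.filter_congr
      intro x _
      rcases Decidable.em (key x = r') with he | he
      · have : r' ≠ r := fun hc => (List.nodup_cons.mp hnd).1 (hc ▸ hr')
        simp [he, this]
      · simp [he]
    have h4 : rs.flatMap
          (fun r' => (xs.filter (fun x => !decide (key x = r))).filter (fun x => key x = r'))
        = rs.flatMap (fun r' => xs.filter (fun x => key x = r')) := by
      rw [List.flatMap, List.flatMap, List.map_congr_left (fun r' hr' => h3 r' hr')]
    rw [List.flatMap_cons]
    exact h1.symm.trans (List.Perm.append_left _ (h4 ▸ h2))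

-- pointwise permutation under flatMap
theorem pvFlatMap_perm {α β : Type} (rs : List β) (f g : β → List α)
    (h : ∀ r ∈ rs, (f r).Perm (g r)) : (rs.flatMap f).Perm (rs.flatMap g) := by
  induction rs with
  | nil => simp
  | cons r rs ih =>
    simp only [List.flatMap_cons]
    exact (h r (List.mem_cons_self)).append (ih (fun r' hr' => h r' (List.mem_cons_of_mem _ hr')))

-- slot-level sweep
def pvSweep (p : Int) : List Int → Int
  | [] => p
  | b :: bs => pvSweep (max b (p + 10)) bs

theorem pvSweep_ge (bs : List Int) : ∀ p, p ≤ pvSweep p bs := by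
  induction bs with
  | nil => intro p; simp [pvSweep]
  | cons b bs ih => intro p; have := ih (max b (p + 10)); simp [pvSweep]; omega

-- the per-bucket invariant induction
theorem pvBucket_fold :
    ∀ (bs : List Int) (S : List Int) (p β : Int), S.Nodup →
      p ∈ S →
      (∀ y ∈ S, (10 : Int) ∣ y - p → y ≤ p) →
      (∀ y : Int, β ≤ y → y ≤ p → (10 : Int) ∣ y - p → y ∈ S) →
      bs.Pairwise (· ≤ ·) →
      (∀ e ∈ bs, β ≤ e ∧ (10 : Int) ∣ e - p) →
      (bs.foldl pvStep S).Nodup ∧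
      (∀ y ∈ S, y ∈ bs.foldl pvStep S) ∧
      (∀ y ∈ bs.foldl pvStep S, y ∈ S ∨ ((10 : Int) ∣ y - p ∧ y ≤ pvSweep p bs)) ∧
      pvSweep p bs ∈ bs.foldl pvStep S ∧
      (∀ y ∈ bs.foldl pvStep S, (10 : Int) ∣ y - p → y ≤ pvSweep p bs) := by
  intro bs
  induction bs with
  | nil =>
    intro S p β hN hp hmax hfull _ _
    simp only [List.foldl_nil, pvSweep]
    exact ⟨hN, fun y hy => hy, fun y hy => Or.inl hy, hp, fun y hy => hmax y hy⟩
  | cons b bs ih =>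
    intro S p β hN hp hmax hfull hsort hbk
    have hbβ : β ≤ b ∧ (10 : Int) ∣ b - p := hbk b List.mem_cons_self
    have hMfacts : (max b (p + 10) = b ∨ max b (p + 10) = p + 10) ∧ b ≤ max b (p + 10) ∧
        p < max b (p + 10) ∧ (10 : Int) ∣ max b (p + 10) - p := by
      rcases max_cases b (p + 10) with ⟨h1, h2⟩ | ⟨h1, h2⟩ <;>
        (rw [h1]; have := hbβ.2; refine ⟨?_, ?_, ?_, ?_⟩ <;> omega)
    set M := max b (p + 10) with hMdef
    have hMb : (10 : Int) ∣ M - b := by have := hbβ.2; have := hMfacts.2.2.2; omega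
    have hMnotin : M ∉ S := by
      intro hc
      have := hmax M hc hMfacts.2.2.2
      have := hMfacts.2.2.1
      omega
    have hmin : ∀ y : Int, b ≤ y → y < M → (10 : Int) ∣ y - b → y ∈ S := by
      intro y h1 h2 h3
      have := hbβ.2
      rcases hMfacts.1 with hM1 | hM1
      · exact absurd h2 (by omega)
      · exact hfull y (by omega) (by omega) (by omega)
    have hstep : pvProbe S b (S.length + 1) = M :=
      pvFF_unique (pvStep_ff S hN b) (pvFF_of hMnotin hMfacts.2.1 hMb hmin)
    have hmem1 : ∀ y, y ∈ pvStep S b ↔ y ∈ S ∨ y = M := by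
      intro y; rw [pvStep_mem, hstep]
    have hpair := List.pairwise_cons.mp hsort
    obtain ⟨C1, C2, C3, C4, C5⟩ := ih (pvStep S b) M b (pvStep_nodup hN b)
      ((hmem1 M).mpr (Or.inr rfl))
      (by
        intro y hy hdv
        rcases (hmem1 y).mp hy with h | h
        · have := hmax y h (by have := hMfacts.2.2.2; omega)
          have := hMfacts.2.2.1
          omega
        · omega)
      (by
        intro y h1 h2 h3
        rcases eq_or_lt_of_le h2 with he | he
        · exact (hmem1 y).mpr (Or.inr he)
        · exact (hmem1 y).mpr (Or.inl (hmin y h1 he (by omega))))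
      hpair.2
      (by
        intro e he
        have h1 := hpair.1 e he
        have h2 := (hbk e (List.mem_cons_of_mem _ he)).2
        exact ⟨h1, by have := hMfacts.2.2.2; omega⟩)
    have hfold : (b :: bs).foldl pvStep S = bs.foldl pvStep (pvStep S b) := by
      simp [List.foldl_cons]
    have hsweep : pvSweep p (b :: bs) = pvSweep M bs := rfl
    rw [hfold, hsweep]
    refine ⟨C1, ?_, ?_, C4, ?_⟩
    · intro y hy
      exact C2 y ((hmem1 y).mpr (Or.inl hy))
    · intro y hy
      rcases C3 y hy with h | h
      · rcases (hmem1 y).mp h with h' | h'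
        · exact Or.inl h'
        · refine Or.inr ⟨by subst h'; exact hMfacts.2.2.2, ?_⟩
          subst h'
          exact pvSweep_ge bs M
      · exact Or.inr ⟨by have := hMfacts.2.2.2; omega, h.2⟩
    · intro y hy hdv
      exact C5 y hy (by have := hMfacts.2.2.2; omega)

-- top slot of a (sorted, same-residue, nonempty) bucket
def pvTopSlot (bs : List Int) : Int :=
  match bs with
  | [] => 0
  | b :: t => pvSweep b t

-- folding one whole fresh bucket
theorem pvBucket_start (bs : List Int) (S : List Int) (hN : S.Nodup)
    (hb : bs ≠ []) (hsort : bs.Pairwise (· ≤ ·))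
    (hres : ∀ e ∈ bs, e % 10 = (bs.headI) % 10)
    (hfresh : ∀ y ∈ S, y % 10 ≠ (bs.headI) % 10) :
    (bs.foldl pvStep S).Nodup ∧
    (∀ y ∈ S, y ∈ bs.foldl pvStep S) ∧
    (∀ y ∈ bs.foldl pvStep S, y ∈ S ∨ (y % 10 = (bs.headI) % 10 ∧ y ≤ pvTopSlot bs)) ∧
    pvTopSlot bs ∈ bs.foldl pvStep S := by
  obtain ⟨b, t, rfl⟩ : ∃ b t, bs = b :: t := by
    cases bs with
    | nil => exact absurd rfl hb
    | cons b t => exact ⟨b, t, rfl⟩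
  · simp only [List.headI_cons] at hres hfresh ⊢
    have hbnot : b ∉ S := fun hc => hfresh b hc rfl
    have hstep : pvProbe S b (S.length + 1) = b :=
      pvFF_unique (pvStep_ff S hN b) (pvFF_of hbnot le_rfl ⟨0, by ring⟩ (by intro y h1 h2 _; omega))
    have hmem1 : ∀ y, y ∈ pvStep S b ↔ y ∈ S ∨ y = b := by
      intro y; rw [pvStep_mem, hstep]
    have hpair := List.pairwise_cons.mp hsort
    obtain ⟨C1, C2, C3, C4, C5⟩ := pvBucket_fold t (pvStep S b) b b (pvStep_nodup hN b)
      ((hmem1 b).mpr (Or.inr rfl))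
      (by
        intro y hy hdv
        rcases (hmem1 y).mp hy with h | h
        · exact absurd (by omega : y % 10 = b % 10) (hfresh y h)
        · omega)
      (by intro y h1 h2 _; exact (hmem1 y).mpr (Or.inr (by omega)))
      hpair.2
      (by
        intro e he
        exact ⟨hpair.1 e he, by have := hres e (List.mem_cons_of_mem _ he); omega⟩)
    have hfold : (b :: t).foldl pvStep S = t.foldl pvStep (pvStep S b) := by
      simp [List.foldl_cons]
    have htop : pvTopSlot (b :: t) = pvSweep b t := rfl
    rw [hfold, htop]
    refine ⟨C1, ?_, ?_, C4⟩
    · intro y hy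
      exact C2 y ((hmem1 y).mpr (Or.inl hy))
    · intro y hy
      rcases C3 y hy with h | h
      · rcases (hmem1 y).mp h with h' | h'
        · exact Or.inl h'
        · exact Or.inr ⟨by omega, by rw [h']; exact pvSweep_ge t b⟩
      · exact Or.inr ⟨by omega, h.2⟩

-- the sorted residue-r bucket of slot indices
def pvBucket (xs : List Int) (r : Int) : List Int :=
  PySem.List.sorted (xs.filter (fun x => x % 10 == r)) (fun x => x)

-- folding all buckets, residue by residue
theorem pvBuckets_fold :
    ∀ (rs : List Int) (S : List Int) (xs : List Int), S.Nodup → rs.Nodup →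
      (∀ r ∈ rs, ∃ x ∈ xs, x % 10 = r) →
      (∀ y ∈ S, y % 10 ∉ rs) →
      ((rs.flatMap (pvBucket xs)).foldl pvStep S).Nodup ∧
      (∀ y ∈ S, y ∈ (rs.flatMap (pvBucket xs)).foldl pvStep S) ∧
      (∀ y ∈ (rs.flatMap (pvBucket xs)).foldl pvStep S,
          y ∈ S ∨ ∃ r ∈ rs, y % 10 = r ∧ y ≤ pvTopSlot (pvBucket xs r)) ∧
      (∀ r ∈ rs, pvTopSlot (pvBucket xs r) ∈ (rs.flatMap (pvBucket xs)).foldl pvStep S) := by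
  intro rs
  induction rs with
  | nil =>
    intro S xs hN _ _ _
    simp only [List.flatMap_nil, List.foldl_nil]
    exact ⟨hN, fun y hy => hy, fun y hy => Or.inl hy, by simp⟩
  | cons r rs ih =>
    intro S xs hN hnd hex hfresh
    obtain ⟨x0, hx0, hx0r⟩ := hex r List.mem_cons_self
    have hx0b : x0 ∈ pvBucket xs r := by
      rw [pvBucket, PySem.List.mem_sorted]
      exact List.mem_filter.mpr ⟨hx0, by simp [hx0r]⟩
    have hbne : pvBucket xs r ≠ [] := List.ne_nil_of_mem hx0b
    have hresb : ∀ e ∈ pvBucket xs r, e % 10 = r := by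
      intro e he
      rw [pvBucket, PySem.List.mem_sorted] at he
      have := (List.mem_filter.mp he).2
      simpa using this
    have hheadmem : (pvBucket xs r).headI ∈ pvBucket xs r := by
      cases h : pvBucket xs r with
      | nil => exact absurd h hbne
      | cons b t => simp
    have hheadr : (pvBucket xs r).headI % 10 = r := hresb _ hheadmem
    obtain ⟨D1, D2, D3, D4⟩ := pvBucket_start (pvBucket xs r) S hN hbne
      (by
        rw [pvBucket]
        exact PySem.List.sorted_pairwise _ _)
      (by intro e he; rw [hresb e he, hheadr])
      (by intro y hy; rw [hheadr]; exact fun hc => hfresh y hy (hc ▸ List.mem_cons_self))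
    have hfr2 : ∀ y ∈ (pvBucket xs r).foldl pvStep S, y % 10 ∉ rs := by
      intro y hy
      rcases D3 y hy with h | h
      · intro hc; exact hfresh y h (List.mem_cons_of_mem _ hc)
      · rw [h.1, hheadr]; exact (List.nodup_cons.mp hnd).1
    obtain ⟨E1, E2, E3, E4⟩ := ih ((pvBucket xs r).foldl pvStep S) xs D1 hnd.of_cons
      (fun r' hr' => hex r' (List.mem_cons_of_mem _ hr')) hfr2
    have hfold : ((r :: rs).flatMap (pvBucket xs)).foldl pvStep S
        = (rs.flatMap (pvBucket xs)).foldl pvStep ((pvBucket xs r).foldl pvStep S) := by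
      rw [List.flatMap_cons, List.foldl_append]
    rw [hfold]
    refine ⟨E1, ?_, ?_, ?_⟩
    · intro y hy; exact E2 y (D2 y hy)
    · intro y hy
      rcases E3 y hy with h | h
      · rcases D3 y h with h' | h'
        · exact Or.inl h'
        · exact Or.inr ⟨r, List.mem_cons_self, by rw [← hheadr]; exact h'.1, h'.2⟩
      · obtain ⟨r', hr', h1, h2⟩ := h
        exact Or.inr ⟨r', List.mem_cons_of_mem _ hr', h1, h2⟩
    · intro r' hr'
      rcases List.mem_cons.mp hr' with he | he
      · subst he; exact E2 _ D4
      · exact E4 r' he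

-- the Option-accumulator loop of pvTop, once started, is a plain fold
theorem pvTopFold (t : List Int) : ∀ q : Int,
    t.foldl (fun p l => some (match p with | none => l | some q => max l (q + 1))) (some q)
      = some (t.foldl (fun q l => max l (q + 1)) q) := by
  induction t with
  | nil => intro q; rfl
  | cons e t ih => intro q; exact ih _

theorem pvFdiv_mono {a b : Int} (h : a ≤ b) :
    PySem.Int.floordiv a 10 ≤ PySem.Int.floordiv b 10 := by
  rw [PySem.Int.floordiv_eq_ediv_of_pos (by norm_num), PySem.Int.floordiv_eq_ediv_of_pos (by norm_num)]
  omega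

-- sorting levels = sorting slots, then dividing
theorem pvSortedMap (ls : List Int) :
    PySem.List.sorted (ls.map (fun x => PySem.Int.floordiv x 10)) (fun x => x)
      = (PySem.List.sorted ls (fun x => x)).map (fun x => PySem.Int.floordiv x 10) := by
  refine PySem.List.sorted_id_eq_of_perm_of_pairwise _ _ ?_ ?_
  · exact (PySem.List.sorted_perm ls (fun x => x) false).map _
  · exact (PySem.List.sorted_pairwise ls (fun x => x)).map _ (fun a b hab => pvFdiv_mono hab)

-- the slot sweep is the level sweep, re-embedded
theorem pvSweepLevel : ∀ (t : List Int) (b : Int), (∀ e ∈ t, e % 10 = b % 10) →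
    pvSweep b t = b % 10 + 10 * ((t.map (fun e => PySem.Int.floordiv e 10)).foldl
      (fun q l => max l (q + 1)) (PySem.Int.floordiv b 10)) := by
  intro t
  induction t with
  | nil =>
    intro b _
    simp only [pvSweep, List.map_nil, List.foldl_nil]
    rw [PySem.Int.floordiv_eq_ediv_of_pos (by norm_num)]
    omega
  | cons e t ih =>
    intro b hres
    have hee : e % 10 = b % 10 := hres e List.mem_cons_self
    have hmaxmod : (max e (b + 10)) % 10 = b % 10 := by
      rcases max_cases e (b + 10) with ⟨h1, _⟩ | ⟨h1, _⟩ <;> rw [h1] <;> omega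
    have hstep : PySem.Int.floordiv (max e (b + 10)) 10
        = max (PySem.Int.floordiv e 10) (PySem.Int.floordiv b 10 + 1) := by
      rw [PySem.Int.floordiv_eq_ediv_of_pos (by norm_num), PySem.Int.floordiv_eq_ediv_of_pos (by norm_num),
        PySem.Int.floordiv_eq_ediv_of_pos (by norm_num)]
      rcases max_cases e (b + 10) with ⟨h1, h2⟩ | ⟨h1, h2⟩ <;>
        rcases max_cases (e / 10) (b / 10 + 1) with ⟨h3, h4⟩ | ⟨h3, h4⟩ <;>
          rw [h1, h3] <;> omega
    have := ih (max e (b + 10)) (by intro e' he'; rw [hres e' (List.mem_cons_of_mem _ he'), ← hmaxmod])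
    simp only [pvSweep, List.map_cons, List.foldl_cons]
    rw [this, hmaxmod, hstep]

-- B's per-residue candidate equals the bucket's top occupied slot
theorem pvCand (xs : List Int) (r : Int) (hne : ∃ x ∈ xs, x % 10 = r) :
    r + 10 * ((pvTop ((xs.filter (fun x => x % 10 == r)).map (fun x => PySem.Int.floordiv x 10))).getD 0)
      = pvTopSlot (pvBucket xs r) := by
  rw [pvTop, pvSortedMap]
  obtain ⟨x0, hx0, hx0r⟩ := hne
  have hx0b : x0 ∈ pvBucket xs r := by
    rw [pvBucket, PySem.List.mem_sorted]
    exact List.mem_filter.mpr ⟨hx0, by simp [hx0r]⟩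
  have hresb : ∀ e ∈ pvBucket xs r, e % 10 = r := by
    intro e he
    rw [pvBucket, PySem.List.mem_sorted] at he
    have := (List.mem_filter.mp he).2
    simpa using this
  obtain ⟨b, t, hbt⟩ : ∃ b t, pvBucket xs r = b :: t := by
    cases hb : pvBucket xs r with
    | nil => rw [hb] at hx0b; cases hx0b
    | cons b t => exact ⟨b, t, rfl⟩
  rw [show PySem.List.sorted (xs.filter (fun x => x % 10 == r)) (fun x => x) = pvBucket xs r from rfl,
    hbt, List.map_cons, List.foldl_cons]
  show r + 10 * ((List.foldl _ (some (PySem.Int.floordiv b 10)) _).getD 0) = pvSweep b t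
  rw [pvTopFold, Option.getD_some]
  have hb10 : b % 10 = r := hresb b (hbt ▸ List.mem_cons_self)
  rw [pvSweepLevel t b (by
    intro e he
    rw [hresb e (hbt ▸ List.mem_cons_of_mem _ he), hb10]), hb10]

-- Port A as a fold of pvStep over the find-indices
theorem pvA_eq (strs : List String) (i : String) :
    solve strs i = (PySem.List.max?
      ((strs.map (fun s => PySem.Str.find s i)).foldl pvStep PySem.Set.empty) (fun x => x)).getD 0 := by
  unfold solve
  rw [List.foldl_map]
  rfl

-- Port B: the bucket dict, computed
theorem pvAltDict (xs : List Int) :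
    (xs.foldl (fun d x => d.modify (x % 10) [] (fun ls => ls ++ [PySem.Int.floordiv x 10]))
        (PySem.Dict.empty : PySem.Dict Int (List Int))).items
      = (PySem.List.dedup (xs.map (fun x => x % 10))).map
          (fun r => (r, (xs.filter (fun x => x % 10 == r)).map (fun x => PySem.Int.floordiv x 10))) := by
  have hnodup : (xs.foldl (fun d x => d.modify (x % 10) [] (fun ls => ls ++ [PySem.Int.floordiv x 10]))
      (PySem.Dict.empty : PySem.Dict Int (List Int))).keys.Nodup := by
    exact PySem.Dict.nodup_keys_foldl_modify_key xs (fun x => x % 10) []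
      (fun d x => fun ls => ls ++ [PySem.Int.floordiv x 10]) PySem.Dict.empty (by simp)
  have hkeys : (xs.foldl (fun d x => d.modify (x % 10) [] (fun ls => ls ++ [PySem.Int.floordiv x 10]))
      (PySem.Dict.empty : PySem.Dict Int (List Int))).keys
      = PySem.List.dedup (xs.map (fun x => x % 10)) := by
    rw [PySem.Dict.keys_foldl_modify_key xs (fun x => x % 10) []
      (fun d x => fun ls => ls ++ [PySem.Int.floordiv x 10]) PySem.Dict.empty]
    rw [PySem.List.dedup_eq_ofList, PySem.Dict.keys_empty]
    exact PySem.Set.update_empty _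
  have hgetD : ∀ r : Int, (xs.foldl (fun d x => d.modify (x % 10) [] (fun ls => ls ++ [PySem.Int.floordiv x 10]))
      (PySem.Dict.empty : PySem.Dict Int (List Int))).getD r []
      = (xs.filter (fun x => x % 10 == r)).map (fun x => PySem.Int.floordiv x 10) := by
    intro r
    have h1 : xs.foldl (fun d x => d.modify (x % 10) [] (fun ls => ls ++ [PySem.Int.floordiv x 10]))
        (PySem.Dict.empty : PySem.Dict Int (List Int))
        = (xs.map (fun x => (x % 10, PySem.Int.floordiv x 10))).foldl
            (fun d p => d.modify p.1 [] (fun ls => ls ++ [p.2])) PySem.Dict.empty := by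
      rw [List.foldl_map]
    rw [h1, PySem.Dict.getD_foldl_modify_append, PySem.Dict.getD_empty, List.nil_append,
      List.filter_map, List.map_map]
    rfl
  rw [PySem.Dict.items_eq_map_keys _ hnodup [], hkeys]
  exact List.map_congr_left (fun r _ => by rw [hgetD r])

-- Port B as a max over per-residue candidates
theorem pvAlt_eq (strs : List String) (i : String) :
    solve_alt strs i = (PySem.List.max?
      ((PySem.List.dedup ((strs.map (fun s => PySem.Str.find s i)).map (fun x => x % 10))).map
        (fun r => r + 10 * ((pvTop (((strs.map (fun s => PySem.Str.find s i)).filter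
          (fun x => x % 10 == r)).map (fun x => PySem.Int.floordiv x 10))).getD 0)))
      (fun x => x)).getD 0 := by
  unfold solve_alt
  have hmod : ∀ x : Int, PySem.Int.mod x 10 = x % 10 :=
    fun x => PySem.Int.mod_eq_emod_of_pos (by norm_num)
  simp only [hmod]
  rw [← List.foldl_map (f := fun s => PySem.Str.find s i)
    (g := fun (d : PySem.Dict Int (List Int)) x => d.modify (x % 10) [] (fun ls => ls ++ [PySem.Int.floordiv x 10]))]
  rw [pvAltDict, List.map_map]
  rfl

-- two nonempty integer lists that dominate each other have the same maximum
theorem pvMax_glue (us L : List Int) (hus : us ≠ []) (hL : L ≠ [])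
    (h1 : ∀ y ∈ us, ∃ z ∈ L, y ≤ z) (h2 : ∀ z ∈ L, z ∈ us) :
    (PySem.List.max? us (fun x => x)).getD 0 = (PySem.List.max? L (fun x => x)).getD 0 := by
  cases hm1 : PySem.List.max? us (fun x => x) with
  | none => exact absurd ((PySem.List.max?_eq_none_iff us _).mp hm1) hus
  | some m1 =>
    cases hm2 : PySem.List.max? L (fun x => x) with
    | none => exact absurd ((PySem.List.max?_eq_none_iff L _).mp hm2) hL
    | some m2 =>
      simp only [Option.getD_some]
      obtain ⟨z, hz, hle⟩ := h1 m1 (PySem.List.max?_mem hm1)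
      have hzle : z ≤ m2 := PySem.List.max?_isMax hm2 z hz
      have hm2le : m2 ≤ m1 := PySem.List.max?_isMax hm1 m2 (h2 m2 (PySem.List.max?_mem hm2))
      omega

-- ===== VERDICT (by name: the statement is the Claim_ definition above) =====
theorem solve_spec : Claim_equal_solve := by
  intro strs i _ hpre
  unfold Spec_solve
  rw [pvA_eq, pvAlt_eq]
  set xs := strs.map (fun s => PySem.Str.find s i) with hxs
  have hxne : xs ≠ [] := by
    rw [hxs]
    exact fun hc => hpre (List.map_eq_nil_iff.mp hc)
  set R := PySem.List.dedup (xs.map (fun x => x % 10)) with hR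
  have hmemR : ∀ x ∈ xs, x % 10 ∈ R := by
    intro x hx
    rw [hR, PySem.List.mem_dedup]
    exact List.mem_map.mpr ⟨x, hx, rfl⟩
  have hexR : ∀ r ∈ R, ∃ x ∈ xs, x % 10 = r := by
    intro r hr
    rw [hR, PySem.List.mem_dedup] at hr
    obtain ⟨x, hx, hxr⟩ := List.mem_map.mp hr
    exact ⟨x, hx, hxr⟩
  have hcand : ∀ r ∈ R,
      r + 10 * ((pvTop ((xs.filter (fun x => x % 10 == r)).map (fun x => PySem.Int.floordiv x 10))).getD 0)
        = pvTopSlot (pvBucket xs r) := fun r hr => pvCand xs r (hexR r hr)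
  rw [List.map_congr_left hcand]
  have hperm : xs.Perm (R.flatMap (pvBucket xs)) := by
    have h1 := pvRegroup (fun x : Int => x % 10) R xs (hR ▸ PySem.List.nodup_dedup _) hmemR
    refine h1.trans (pvFlatMap_perm R _ _ ?_)
    intro r hr
    have he : xs.filter (fun x => decide (x % 10 = r)) = xs.filter (fun x => x % 10 == r) :=
      List.filter_congr (fun x _ => rfl)
    rw [he, pvBucket]
    exact (PySem.List.sorted_perm _ _ _).symm
  have hE := pvFold_perm hperm [] [] ⟨List.nodup_nil, List.nodup_nil, fun y => Iff.rfl⟩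
  obtain ⟨F1, _, F3, F4⟩ := pvBuckets_fold R [] xs List.nodup_nil (hR ▸ PySem.List.nodup_dedup _)
    hexR (by simp)
  have hRne : R ≠ [] := by
    obtain ⟨x, hx⟩ := List.exists_mem_of_ne_nil xs hxne
    exact List.ne_nil_of_mem (hmemR x hx)
  obtain ⟨r0, hr0⟩ := List.exists_mem_of_ne_nil R hRne
  have husne : xs.foldl pvStep [] ≠ [] := by
    have : pvTopSlot (pvBucket xs r0) ∈ xs.foldl pvStep [] :=
      (hE.2.2 _).mpr (F4 r0 hr0)
    exact List.ne_nil_of_mem this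
  refine pvMax_glue _ _ husne (fun hc => hRne (List.map_eq_nil_iff.mp hc)) ?_ ?_
  · intro y hy
    rcases F3 y ((hE.2.2 y).mp hy) with h | h
    · cases h
    · obtain ⟨r, hr, _, hle⟩ := h
      exact ⟨pvTopSlot (pvBucket xs r), List.mem_map.mpr ⟨r, hr, rfl⟩, hle⟩
  · intro z hz
    obtain ⟨r, hr, rfl⟩ := List.mem_map.mp hz
    exact (hE.2.2 _).mpr (F4 r hr)
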